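-- pv_equiv track=rewrite | github.com/gahjelle/everybody_codes | python/src/2025_the-song-of-ducks-and-dragons/06_mentorship-matrix/ec202506.py | count_mentors
-- ===== SOURCE A (Python) =====
-- MENTOR = "ABC"
--
-- NOVICE = "abc"
--
-- def count_mentors(people: list[str]) -> int:
--     """Count the number of mentor/novice pairs in the given list.
--
--     ## Example:
--
--     >>> count_mentors("bBbbB")
--     2
--     >>> count_mentors("CCcCCCc")
--     7
--     """
--     acc = 0  # Can alternatively use itertools.accumulate
--     mentors = [acc := acc + (person in MENTOR) for person in people]
--     return sum(
--         num_mentors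
--         for num_mentors, person in zip(mentors, people, strict=True)
--         if person in NOVICE
--     )
-- ===== SOURCE B (Python) =====
-- MENTOR = "ABC"
--
-- NOVICE = "abc"
--
--
-- def count_mentors(people: list[str]) -> int:
--     """Count mentor/novice pairs by a single reverse pass.
--
--     Traverse people right-to-left keeping a running count of novices seen
--     so far (i.e. novices at or after the current position); each mentor
--     contributes that suffix novice count to the total.
--     """
--     total = 0
--     novices = 0
--     for person in reversed(people):
--         if person in NOVICE:
--             novices += 1
--         if person in MENTOR:
--             total += novices
--     return total
-- ===== Notes on version B (the rewrite author's own statement) =====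
-- stated objective: faster
-- what changed: Replaced A's two-pass scheme (build the full prefix-mentor-count list with a walrus comprehension, then zip it with people and sum at novice positions) with a single reverse pass keeping one scalar suffix count of novices, added to the total at each mentor; same mentor-before-novice pair count, no intermediate list.
import Mathlib
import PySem

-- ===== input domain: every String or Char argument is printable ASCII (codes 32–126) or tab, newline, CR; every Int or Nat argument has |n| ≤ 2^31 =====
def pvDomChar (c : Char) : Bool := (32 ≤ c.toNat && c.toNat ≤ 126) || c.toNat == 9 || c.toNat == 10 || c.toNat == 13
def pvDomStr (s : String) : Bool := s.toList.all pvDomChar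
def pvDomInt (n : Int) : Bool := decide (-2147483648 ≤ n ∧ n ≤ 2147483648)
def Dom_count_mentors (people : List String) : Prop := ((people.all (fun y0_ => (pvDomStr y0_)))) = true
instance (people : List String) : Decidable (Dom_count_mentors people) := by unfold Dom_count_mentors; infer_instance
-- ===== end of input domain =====

-- B replaces A's prefix-count list + zip-sum with one reverse pass keeping a scalar suffix novice count (alternative decomposition, O(1) extra space).

-- shared transliteration of Python's substring tests 'person in MENTOR' / 'person in NOVICE'
def isMentor (p : String) : Bool := PySem.Str.isIn p "ABC"
def isNovice (p : String) : Bool := PySem.Str.isIn p "abc"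

-- ===== PORT A =====
-- the walrus comprehension [acc := acc + (person in MENTOR) for person in people]
def prefixMentors (acc : Int) : List String → List Int
  | [] => []
  | p :: ps =>
      let acc' := acc + (if isMentor p then 1 else 0)
      acc' :: prefixMentors acc' ps

def count_mentors (people : List String) : Int :=
  let mentors := prefixMentors 0 people
  -- sum(num_mentors for num_mentors, person in zip(mentors, people) if person in NOVICE)
  -- (strict=True never raises: the two lists always have equal length)
  (((mentors.zip people).filter (fun q => isNovice q.2)).map (fun q => q.1)).sum

-- ===== PORT B =====
def count_mentors_alt (people : List String) : Int :=
  (people.reverse.foldl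
    (fun (st : Int × Int) person =>
      let novices := if isNovice person then st.2 + 1 else st.2
      let total := if isMentor person then st.1 + novices else st.1
      (total, novices)) (0, 0)).1

-- ===== PRECONDITION & SPEC =====
def Spec_count_mentors (people : List String) (out : Int) : Prop := out = count_mentors_alt people
instance (people : List String) (out : Int) : Decidable (Spec_count_mentors people out) := by unfold Spec_count_mentors; infer_instance

-- ===== CLAIM (what is proved, stated in full; the proofs are below) =====
def Claim_equal_count_mentors : Prop := ∀ (people : List String), Dom_count_mentors people → Spec_count_mentors people (count_mentors people)

-- ===== LEMMAS AND PROOFS =====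

def menC (xs : List String) : Int := (xs.countP isMentor : Int)
def novC (xs : List String) : Int := (xs.countP isNovice : Int)

-- pairs counted from the mentor side (front recursion): mentor at the head pairs with every novice at or after it
def pairsS : List String → Int
  | [] => 0
  | p :: l => (if isMentor p then novC (p :: l) else 0) + pairsS l

-- pairs counted from the novice side of the REVERSED list: novice at the head pairs with every mentor at or after it
def pairsRev : List String → Int
  | [] => 0
  | p :: l => pairsRev l + (if isNovice p then menC (p :: l) else 0)

theorem novC_nil : novC [] = 0 := by simp [novC]
theorem menC_nil : menC [] = 0 := by simp [menC]

theorem novC_cons (p : String) (l : List String) :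
    novC (p :: l) = (if isNovice p then 1 else 0) + novC l := by
  unfold novC; rw [List.countP_cons]
  by_cases h : isNovice p <;> simp [h, Int.add_comm]

theorem menC_cons (p : String) (l : List String) :
    menC (p :: l) = (if isMentor p then 1 else 0) + menC l := by
  unfold menC; rw [List.countP_cons]
  by_cases h : isMentor p <;> simp [h, Int.add_comm]

theorem novC_append (xs ys : List String) : novC (xs ++ ys) = novC xs + novC ys := by
  simp [novC, List.countP_append]

theorem menC_append (xs ys : List String) : menC (xs ++ ys) = menC xs + menC ys := by
  simp [menC, List.countP_append]

theorem novC_reverse (xs : List String) : novC xs.reverse = novC xs := by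
  simp [novC]

theorem pairsRev_append_singleton (p : String) (ys : List String) :
    pairsRev (ys ++ [p]) = pairsRev ys + (if isMentor p then novC (ys ++ [p]) else 0) := by
  induction ys with
  | nil =>
      simp only [List.nil_append, pairsRev, menC_cons, menC_nil, novC_cons, novC_nil]
      by_cases hm : isMentor p <;> by_cases hn : isNovice p <;> simp [hm, hn]
  | cons y ys ih =>
      simp only [List.cons_append, pairsRev, ih, menC_cons, menC_append, novC_cons, novC_append]
      by_cases hm : isMentor p <;> by_cases hn : isNovice p <;> by_cases hy : isNovice y <;>
        simp [hm, hn, hy, menC_nil, novC_nil] <;> ring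

theorem pairsS_eq_pairsRev_reverse (xs : List String) :
    pairsS xs = pairsRev xs.reverse := by
  induction xs with
  | nil => simp [pairsS, pairsRev]
  | cons p xs ih =>
      simp only [pairsS, List.reverse_cons, pairsRev_append_singleton, ih]
      have : novC (xs.reverse ++ [p]) = novC (p :: xs) := by
        rw [novC_append, novC_reverse, novC_cons, novC_cons, novC_nil]; ring
      rw [this]; ring

-- A's sum over the prefix list, with the running count generalized
theorem sumA_eq (ps : List String) : ∀ acc : Int,
    ((((prefixMentors acc ps).zip ps).filter (fun q => isNovice q.2)).map (fun q => q.1)).sum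
      = acc * novC ps + pairsS ps := by
  induction ps with
  | nil => intro acc; simp [prefixMentors, novC_nil, pairsS]
  | cons p ps ih =>
      intro acc
      simp only [prefixMentors, List.zip_cons_cons, List.filter_cons]
      rw [pairsS, novC_cons]
      by_cases hm : isMentor p <;> by_cases hn : isNovice p <;>
        simp [hm, hn, ih] <;> ring

-- B's reverse fold characterized on an arbitrary list
theorem foldB_eq (l : List String) : ∀ t v : Int,
    (l.foldl
      (fun (st : Int × Int) person =>
        let novices := if isNovice person then st.2 + 1 else st.2
        let total := if isMentor person then st.1 + novices else st.1
        (total, novices)) (t, v))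
      = (t + v * menC l + pairsRev l, v + novC l) := by
  induction l with
  | nil => intro t v; simp [menC_nil, novC_nil, pairsRev]
  | cons p l ih =>
      intro t v
      simp only [List.foldl_cons, ih, pairsRev, menC_cons, novC_cons]
      by_cases hm : isMentor p <;> by_cases hn : isNovice p <;>
        simp [hm, hn] <;> first | (constructor <;> ring) | ring

-- ===== VERDICT (by name: the statement is the Claim_ definition above) =====
theorem count_mentors_spec : Claim_equal_count_mentors := by
  intro people _
  unfold Spec_count_mentors count_mentors count_mentors_alt
  rw [foldB_eq]
  simp only [sumA_eq]
  rw [← pairsS_eq_pairsRev_reverse]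
  ring
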